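-- pv_equiv track=rewrite | github.com/baltazarortiz/autosec-iap-2018 | control_dashboard.py | mph_checksum
-- ===== SOURCE A (Python) =====
-- def mph_checksum(s, count):
--     sum = 0
--     for c in s:
--         sum += int(c, 16)
--
--     sum += count
--
--     if (sum % 16) <= 10:
--         return hex(10-(sum%16))[-1]
--     elif (sum % 16) == 11:
--         return 'f'
--     elif (sum % 16) == 12:
--         return 'e'
--     elif (sum % 16) == 13:
--         return 'd'
--     elif (sum % 16) == 14:
--         return 'c'
--     elif (sum % 16) == 15:
--         return 'b'
--     elif (sum % 16) == 0:
--         return 'a'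
-- ===== SOURCE B (Python) =====
-- def mph_checksum(s, count):
--     # histogram of characters: int(c, 16) is evaluated once per DISTINCT character
--     freq = {}
--     for c in s:
--         freq[c] = freq.get(c, 0) + 1
--     total = count
--     for c, k in freq.items():
--         total += int(c, 16) * k
--     # the checksum digit is the unique hex digit d with (total + d) % 16 == 10
--     for d in '0123456789abcdef':
--         if (total + int(d, 16)) % 16 == 10:
--             return d
-- ===== Notes on version B (the rewrite author's own statement) =====
-- stated objective: alternative
-- what changed: B builds a character histogram and forms the total as a weighted sum over distinct characters (int(c,16) runs once per distinct char, not per char), then finds the checksum digit by searching the 16 hex digits for the unique d with (total+d) % 16 == 10, instead of A's per-character summing loop followed by a 7-way if/elif ladder with hex() string slicing.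
import Mathlib
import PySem

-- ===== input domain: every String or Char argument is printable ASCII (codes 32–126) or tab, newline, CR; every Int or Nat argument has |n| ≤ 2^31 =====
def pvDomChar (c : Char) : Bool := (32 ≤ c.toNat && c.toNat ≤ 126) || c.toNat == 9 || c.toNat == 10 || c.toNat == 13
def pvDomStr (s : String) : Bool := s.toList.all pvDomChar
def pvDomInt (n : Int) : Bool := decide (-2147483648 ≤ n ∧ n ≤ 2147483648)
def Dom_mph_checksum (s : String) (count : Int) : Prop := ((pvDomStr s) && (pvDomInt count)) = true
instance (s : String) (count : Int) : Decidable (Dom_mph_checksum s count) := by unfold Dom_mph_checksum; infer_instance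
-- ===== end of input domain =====

-- B builds a character histogram (weighted sum over distinct chars) and finds the checksum
-- digit by searching the 16 hex digits for the one making total ≡ 10 (mod 16); objective: alternative (same O(n) cost).

-- ===== PORT A =====

-- int(c, 16) for a single character c: exact (ValueError = none)
def hexVal? (c : Char) : Option Int :=
  if 48 ≤ c.toNat ∧ c.toNat ≤ 57 then some ((c.toNat : Int) - 48)
  else if 97 ≤ c.toNat ∧ c.toNat ≤ 102 then some ((c.toNat : Int) - 87)
  else if 65 ≤ c.toNat ∧ c.toNat ≤ 70 then some ((c.toNat : Int) - 55)
  else none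

def hexDigitChar (n : Nat) : Char := "0123456789abcdef".toList.getD n '0'

-- the hex-digit part of hex(n) for 0 ≤ n (most significant first; fuel n+1 suffices)
def hexDigitsAux : Nat → Nat → List Char
  | 0, _ => []
  | fuel + 1, n =>
    if n < 16 then [hexDigitChar n]
    else hexDigitsAux fuel (n / 16) ++ [hexDigitChar (n % 16)]

def hexDigits (n : Nat) : List Char := hexDigitsAux (n + 1) n

-- hex(n)[-1] for 0 ≤ n (A only calls it with 0 ≤ n ≤ 10); none of pyGet? unreachable ([-1] of nonempty)
def pyHexLast (n : Int) : String :=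
  match PySem.List.pyGet? ('0' :: 'x' :: hexDigits n.toNat) (-1) with
  | some c => String.mk [c]
  | none => ""

def mph_checksum (s : String) (count : Int) : String :=
  match s.toList.foldl
      (fun acc c => match acc, hexVal? c with
        | some a, some v => some (a + v)
        | _, _ => none) (some 0) with
  | none => ""  -- unreachable under Pre_ (int(c,16) raised ValueError)
  | some sm0 =>
    let sm := sm0 + count
    if PySem.Int.mod sm 16 ≤ 10 then pyHexLast (10 - PySem.Int.mod sm 16)
    else if PySem.Int.mod sm 16 = 11 then "f"
    else if PySem.Int.mod sm 16 = 12 then "e"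
    else if PySem.Int.mod sm 16 = 13 then "d"
    else if PySem.Int.mod sm 16 = 14 then "c"
    else if PySem.Int.mod sm 16 = 15 then "b"
    else if PySem.Int.mod sm 16 = 0 then "a"
    else ""  -- Python falls through returning None; unreachable (0 ≤ sm%16 < 16)

-- ===== PORT B =====

-- the final search loop: first hex digit d with (total + int(d,16)) % 16 == 10;
-- "" = Python's fall-through None (unreachable: some digit always matches)
def searchDigit : List Char → Int → String
  | [], _ => ""
  | d :: rest, total =>
    if PySem.Int.mod (total + (hexVal? d).getD 0) 16 = 10 then String.mk [d]
    else searchDigit rest total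

def mph_checksum_alt (s : String) (count : Int) : String :=
  -- freq[c] = freq.get(c, 0) + 1
  let freq := s.toList.foldl (fun d c => d.insert c (d.getD c 0 + 1))
    (PySem.Dict.empty : PySem.Dict Char Int)
  -- total += int(c,16) * k   ((hexVal? _).getD 0 is exact on hex chars; Pre_ admits only those)
  let total := freq.items.foldl (fun t p => t + (hexVal? p.1).getD 0 * p.2) count
  searchDigit "0123456789abcdef".toList total

-- ===== PRECONDITION & SPEC =====
-- Pre_ excludes strings containing a non-hex-digit character: A raises ValueError at int(c,16) there.
def Pre_mph_checksum (s : String) (count : Int) : Prop :=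
  s.toList.all (fun c => decide ((48 ≤ c.toNat ∧ c.toNat ≤ 57) ∨ (97 ≤ c.toNat ∧ c.toNat ≤ 102) ∨
    (65 ≤ c.toNat ∧ c.toNat ≤ 70))) = true
instance (s : String) (count : Int) : Decidable (Pre_mph_checksum s count) := by
  unfold Pre_mph_checksum; infer_instance

def pvWitness_mph_checksum : String × Int := ("1aF", 3)

def Spec_mph_checksum (s : String) (count : Int) (out : String) : Prop := out = mph_checksum_alt s count
instance (s : String) (count : Int) (out : String) : Decidable (Spec_mph_checksum s count out) := by unfold Spec_mph_checksum; infer_instance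

-- ===== CLAIM (what is proved, stated in full; the proofs are below) =====
def Claim_equal_mph_checksum : Prop := ∀ (s : String) (count : Int), Dom_mph_checksum s count → Pre_mph_checksum s count → Spec_mph_checksum s count (mph_checksum s count)

-- ===== LEMMAS AND PROOFS =====

def isHexChar (c : Char) : Prop :=
  (48 ≤ c.toNat ∧ c.toNat ≤ 57) ∨ (97 ≤ c.toNat ∧ c.toNat ≤ 102) ∨ (65 ≤ c.toNat ∧ c.toNat ≤ 70)

-- on a hex-digit character int(c,16) returns a value
lemma hexVal?_eq (c : Char) (h : isHexChar c) : hexVal? c = some ((hexVal? c).getD 0) := by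
  unfold isHexChar at h
  simp only [hexVal?]
  obtain ⟨h1, h2⟩ | ⟨h1, h2⟩ | ⟨h1, h2⟩ := h
  · rw [if_pos ⟨h1, h2⟩]; rfl
  · rw [if_neg (by omega), if_pos ⟨h1, h2⟩]; rfl
  · rw [if_neg (by omega), if_neg (by omega), if_pos ⟨h1, h2⟩]; rfl

-- A's accumulating Option fold equals some (a + sum of digit values) on hex-digit strings
lemma fold_eq_sum (l : List Char) (h : ∀ c ∈ l, isHexChar c) (a : Int) :
    l.foldl (fun acc c => match acc, hexVal? c with
        | some x, some v => some (x + v)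
        | _, _ => none) (some a) = some (a + (l.map (fun c => (hexVal? c).getD 0)).sum) := by
  induction l generalizing a with
  | nil => simp
  | cons c t ih =>
    simp only [List.foldl_cons, List.map_cons, List.sum_cons]
    rw [hexVal?_eq c (h c (by simp))]
    rw [ih (fun x hx => h x (by simp [hx])) (a + (hexVal? c).getD 0)]
    simp only [Option.getD_some]
    congr 1
    ring

-- the weighted sum over the distinct characters equals the plain per-character sum
lemma dedup_weighted_sum (l : List Char) (f : Char → Int) :
    ((PySem.Set.ofList l).map (fun k => f k * (l.count k : Int))).sum = (l.map f).sum := by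
  rw [← List.sum_toFinset _ (PySem.Set.nodup_ofList l)]
  have hfs : (PySem.Set.ofList l).toFinset = l.toFinset := by
    ext x; simp [PySem.Set.mem_ofList]
  rw [hfs, Finset.sum_list_map_count]
  refine Finset.sum_congr rfl fun x _ => ?_
  rw [nsmul_eq_mul, mul_comm]

-- searchDigit only depends on total modulo 16
lemma searchDigit_mod (l : List Char) (t₁ t₂ : Int) (h : t₁ % 16 = t₂ % 16) :
    searchDigit l t₁ = searchDigit l t₂ := by
  induction l with
  | nil => rfl
  | cons d rest ih =>
    simp only [searchDigit,
      PySem.Int.mod_eq_emod_of_pos (b := (16 : Int)) (by norm_num)]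
    have : (t₁ + (hexVal? d).getD 0) % 16 = (t₂ + (hexVal? d).getD 0) % 16 := by omega
    rw [this, ih]

-- A's branch ladder on t%16 equals B's search over the 16 candidate digits
lemma ladder_eq_search (t : Int) :
    (if PySem.Int.mod t 16 ≤ 10 then pyHexLast (10 - PySem.Int.mod t 16)
     else if PySem.Int.mod t 16 = 11 then "f"
     else if PySem.Int.mod t 16 = 12 then "e"
     else if PySem.Int.mod t 16 = 13 then "d"
     else if PySem.Int.mod t 16 = 14 then "c"
     else if PySem.Int.mod t 16 = 15 then "b"
     else if PySem.Int.mod t 16 = 0 then "a"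
     else "") = searchDigit "0123456789abcdef".toList t := by
  rw [searchDigit_mod _ t (t % 16) (by omega),
      PySem.Int.mod_eq_emod_of_pos (a := t) (by norm_num)]
  have h0 : 0 ≤ t % 16 := Int.emod_nonneg t (by norm_num)
  have h1 : t % 16 < 16 := Int.emod_lt_of_pos t (by norm_num)
  generalize t % 16 = r at h0 h1 ⊢
  interval_cases r <;> decide

-- ===== VERDICT (by name: the statement is the Claim_ definition above) =====
theorem mph_checksum_spec : Claim_equal_mph_checksum := by
  intro s count _ hpre
  have hpre' : ∀ c ∈ s.toList, isHexChar c := by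
    simpa [Pre_mph_checksum, List.all_eq_true, isHexChar] using hpre
  unfold Spec_mph_checksum mph_checksum mph_checksum_alt
  rw [fold_eq_sum s.toList hpre' 0]
  simp only [zero_add]
  rw [PySem.Dict.foldl_insert_getD_add_one_eq_counter, PySem.Dict.items_counter,
      PySem.List.foldl_add]
  rw [List.map_map]
  have : ((PySem.Set.ofList s.toList).map
      ((fun p : Char × Int => (hexVal? p.1).getD 0 * p.2) ∘ fun k => (k, (s.toList.count k : Int)))).sum
      = (s.toList.map (fun c => (hexVal? c).getD 0)).sum := by
    exact dedup_weighted_sum s.toList _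
  rw [this]
  rw [show (s.toList.map (fun c => (hexVal? c).getD 0)).sum + count
        = count + (s.toList.map (fun c => (hexVal? c).getD 0)).sum from by ring]
  exact ladder_eq_search _
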